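-- pv_equiv track=rewrite | github.com/prabhatkr007/Python-Lab | exp5/problem4.py | check
-- ===== SOURCE A (Python) =====
-- def check(str):
--     str1 = ""
--     str2 = ""
--     for i in str:
--         if str.count(i) > 1 and i not in str1:
--             str1 = str1+i
--         elif str.count(i) == 1:
--             str2 = str2+i
--     return str1, str2
-- ===== SOURCE B (Python) =====
-- def check(str):
--     counts = {}
--     for ch in str:
--         counts[ch] = counts.get(ch, 0) + 1
--     keys = list(counts)
--     str1 = "".join(c for c in keys if counts[c] > 1)
--     str2 = "".join(c for c in keys if counts[c] == 1)
--     return str1, str2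
-- ===== Notes on version B (the rewrite author's own statement) =====
-- stated objective: faster
-- what changed: B tallies character frequencies into a dict in one pass and then builds str1/str2 as two filters over the distinct keys (first-appearance order), removing A's per-character str.count rescan and its membership test against the accumulated str1.
import Mathlib
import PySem

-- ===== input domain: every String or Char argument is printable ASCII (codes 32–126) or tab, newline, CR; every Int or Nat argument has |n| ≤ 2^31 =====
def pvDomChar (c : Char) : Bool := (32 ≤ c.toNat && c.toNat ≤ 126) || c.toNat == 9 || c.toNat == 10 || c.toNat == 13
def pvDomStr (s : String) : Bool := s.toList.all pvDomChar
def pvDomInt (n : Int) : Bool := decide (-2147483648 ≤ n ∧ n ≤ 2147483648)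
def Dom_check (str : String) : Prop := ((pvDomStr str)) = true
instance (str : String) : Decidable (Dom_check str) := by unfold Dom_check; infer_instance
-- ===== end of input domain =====

-- B replaces A's per-character str.count rescan and 'not in str1' test by a one-pass
-- frequency dict whose distinct keys (first-appearance order) are filtered twice: faster.

-- ===== PORT A =====
-- 'str.count(i)' for the single character i of str is the character count (exact: a
-- 1-char substring occurs exactly as often as the character), and 'i not in str1' is
-- character membership in the accumulated string; both accumulators are kept as List Char.
def check (str : String) : String × String :=
  let cs := str.toList
  let st := cs.foldl (fun (st : List Char × List Char) i =>
    if 1 < cs.count i ∧ i ∉ st.1 then (st.1 ++ [i], st.2)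
    else if cs.count i = 1 then (st.1, st.2 ++ [i])
    else st) ([], [])
  (String.ofList st.1, String.ofList st.2)

-- ===== PORT B =====
def check_alt (str : String) : String × String :=
  let counts := str.toList.foldl
    (fun (d : PySem.Dict Char Int) ch => d.insert ch (d.getD ch 0 + 1)) PySem.Dict.empty
  let keys := counts.keys
  (String.ofList (keys.filter (fun c => 1 < counts.getD c 0)),
   String.ofList (keys.filter (fun c => counts.getD c 0 = 1)))

-- ===== PRECONDITION & SPEC =====
def Spec_check (str : String) (out : String × String) : Prop := out = check_alt str
instance (str : String) (out : String × String) : Decidable (Spec_check str out) := by unfold Spec_check; infer_instance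

-- ===== CLAIM (what is proved, stated in full; the proofs are below) =====
def Claim_equal_check : Prop := ∀ (str : String), Dom_check str → Spec_check str (check str)

-- ===== LEMMAS AND PROOFS =====

-- Recursive description of A's str1 accumulation: first occurrences (relative to the
-- already-collected s1) of characters satisfying q.
def pvF1 (q : Char → Bool) : List Char → List Char → List Char
  | [], _ => []
  | i :: r, s1 => if q i ∧ i ∉ s1 then i :: pvF1 q r (s1 ++ [i]) else pvF1 q r s1

theorem pvAdd_of_mem {s : List Char} {i : Char} (hm : i ∈ s) : PySem.Set.add s i = s := by
  simp [PySem.Set.add, PySem.Set.contains, hm]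

theorem pvAdd_of_not_mem {s : List Char} {i : Char} (hm : i ∉ s) :
    PySem.Set.add s i = s ++ [i] := by
  simp [PySem.Set.add, PySem.Set.contains, hm]

-- the dedup fold only appends
theorem pvFoldlAdd_append (l : List Char) : ∀ s : List Char,
    ∃ t, l.foldl PySem.Set.add s = s ++ t := by
  induction l with
  | nil => intro s; exact ⟨[], by simp⟩
  | cons i l ih =>
      intro s
      obtain ⟨t, ht⟩ := ih (PySem.Set.add s i)
      by_cases hm : i ∈ s
      · exact ⟨t, by rw [List.foldl_cons, ht, pvAdd_of_mem hm]⟩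
      · exact ⟨i :: t, by rw [List.foldl_cons, ht, pvAdd_of_not_mem hm]; simp⟩

theorem pvF1_eq (q : Char → Bool) : ∀ (r s1 : List Char),
    pvF1 q r s1 = ((r.filter q).foldl PySem.Set.add s1).drop s1.length := by
  intro r
  induction r with
  | nil => intro s1; simp [pvF1]
  | cons i r ih =>
      intro s1
      by_cases hq : q i = true
      · by_cases hm : i ∈ s1
        · rw [List.filter_cons_of_pos hq, List.foldl_cons, pvAdd_of_mem hm]
          simp [pvF1, hq, hm, ih]
        · rw [List.filter_cons_of_pos hq, List.foldl_cons, pvAdd_of_not_mem hm]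
          obtain ⟨t, ht⟩ := pvFoldlAdd_append (r.filter q) (s1 ++ [i])
          simp only [pvF1, hq, hm, not_false_eq_true, and_self, if_true, ih, ht]
          simp
      · rw [List.filter_cons_of_neg (by simpa using hq)]
        simp [pvF1, hq, ih]

-- the combined loop of port A
theorem pvLoopA (cs : List Char) : ∀ (r : List Char) (s1 s2 : List Char),
    r.foldl (fun (st : List Char × List Char) i =>
      if 1 < cs.count i ∧ i ∉ st.1 then (st.1 ++ [i], st.2)
      else if cs.count i = 1 then (st.1, st.2 ++ [i])
      else st) (s1, s2)
    = (s1 ++ pvF1 (fun c => decide (1 < cs.count c)) r s1,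
       s2 ++ r.filter (fun c => decide (cs.count c = 1))) := by
  intro r
  induction r with
  | nil => intro s1 s2; simp [pvF1]
  | cons i r ih =>
      intro s1 s2
      by_cases hq : 1 < cs.count i
      · have h1 : ¬ cs.count i = 1 := by omega
        by_cases hm : i ∈ s1
        · simp [List.foldl_cons, hq, hm, h1, pvF1, ih]
        · simp [List.foldl_cons, hq, hm, h1, pvF1, ih]
      · by_cases h1 : cs.count i = 1
        · simp [List.foldl_cons, h1, pvF1, ih]
        · simp [List.foldl_cons, hq, h1, pvF1, ih]

-- the dedup fold commutes with filter
theorem pvFoldlAdd_filter (q : Char → Bool) : ∀ (l s : List Char),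
    ((l.foldl PySem.Set.add s).filter q) = (l.filter q).foldl PySem.Set.add (s.filter q) := by
  intro l
  induction l with
  | nil => intro s; simp
  | cons i l ih =>
      intro s
      rw [List.foldl_cons, ih]
      by_cases hq : q i = true
      · rw [List.filter_cons_of_pos hq, List.foldl_cons]
        congr 1
        by_cases hm : i ∈ s
        · rw [pvAdd_of_mem hm, pvAdd_of_mem (List.mem_filter.mpr ⟨hm, hq⟩)]
        · rw [pvAdd_of_not_mem hm, List.filter_append, List.filter_cons_of_pos hq,
            List.filter_nil, pvAdd_of_not_mem (fun h => hm (List.mem_filter.mp h).1)]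
      · rw [List.filter_cons_of_neg (by simpa using hq)]
        congr 1
        by_cases hm : i ∈ s
        · rw [pvAdd_of_mem hm]
        · rw [pvAdd_of_not_mem hm, List.filter_append, List.filter_cons_of_neg
            (by simpa using hq), List.filter_nil, List.append_nil]

theorem pvOfList_filter (q : Char → Bool) (l : List Char) :
    PySem.Set.ofList (l.filter q) = (PySem.Set.ofList l).filter q := by
  rw [PySem.Set.ofList_eq_foldl, PySem.Set.ofList_eq_foldl, pvFoldlAdd_filter]
  rfl

-- characters occurring exactly once: filtering the string = filtering its dedup
theorem pvFilter_once (cs : List Char) :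
    cs.filter (fun c => decide (cs.count c = 1))
      = (PySem.Set.ofList cs).filter (fun c => decide (cs.count c = 1)) := by
  have hnd : (cs.filter (fun c => decide (cs.count c = 1))).Nodup := by
    rw [List.nodup_iff_count_le_one]
    intro a
    by_cases ha : a ∈ cs.filter (fun c => decide (cs.count c = 1))
    · have h1 : cs.count a = 1 := by simpa using (List.mem_filter.mp ha).2
      have hs : (cs.filter (fun c => decide (cs.count c = 1))).Sublist cs :=
        List.filter_sublist
      have := hs.count_le a
      omega
    · simp [List.count_eq_zero_of_not_mem ha]
  rw [← pvOfList_filter]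
  exact (PySem.Set.ofList_eq_self_of_nodup _ hnd).symm

-- ===== VERDICT (by name: the statement is the Claim_ definition above) =====
theorem check_spec : Claim_equal_check := by
  intro str _
  unfold Spec_check
  simp only [check, check_alt]
  rw [PySem.Dict.foldl_insert_getD_add_one_eq_counter]
  rw [pvLoopA str.toList str.toList]
  rw [PySem.Dict.keys_counter]
  rw [pvF1_eq]
  simp only [List.length_nil, List.drop_zero, List.nil_append, Prod.mk.injEq]
  rw [← PySem.Set.ofList_eq_foldl, pvOfList_filter, pvFilter_once]
  constructor
  · congr 1
    apply List.filter_congr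
    intro c _
    simp [PySem.Dict.getD_counter]
  · congr 1
    apply List.filter_congr
    intro c _
    simp [PySem.Dict.getD_counter]
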